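-- pv_equiv track=rewrite | github.com/akmanjr/Blackjack | Blackjack points.py | assignCardValues
-- ===== SOURCE A (Python) =====
-- def assignCardValues(deckOfCards = []):
--     """
--     TO DO: Complete documentation.
--     """
--     cardValues = {}
--     for card in range(len(deckOfCards)):
--         if "Ace" in deckOfCards[card]:
--             cardValues[(deckOfCards[card])] = 1
--         elif "Two" in deckOfCards[card]:
--             cardValues[(deckOfCards[card])] = 2
--         elif "Three" in deckOfCards[card]:
--             cardValues[(deckOfCards[card])] = 3
--         elif "Four" in deckOfCards[card]:
--             cardValues[(deckOfCards[card])] = 4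
--         elif "Five" in deckOfCards[card]:
--             cardValues[(deckOfCards[card])] = 5
--         elif "Six" in deckOfCards[card]:
--             cardValues[(deckOfCards[card])] = 6
--         elif "Seven" in deckOfCards[card]:
--             cardValues[(deckOfCards[card])] = 7
--         elif "Eight" in deckOfCards[card]:
--             cardValues[(deckOfCards[card])] = 8
--         elif "Nine" in deckOfCards[card]:
--             cardValues[(deckOfCards[card])] = 9
--         elif "Ten" in deckOfCards[card]:
--             cardValues[(deckOfCards[card])] = 10
--         elif "Jack" in deckOfCards[card]:
--             cardValues[(deckOfCards[card])] = 10
--         elif "Queen" in deckOfCards[card]: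
--             cardValues[(deckOfCards[card])] = 10
--         elif "King" in deckOfCards[card]:
--             cardValues[(deckOfCards[card])] = 10
--
--     return cardValues
-- ===== SOURCE B (Python) =====
-- RANKS = ["Ace", "Two", "Three", "Four", "Five", "Six", "Seven",
--          "Eight", "Nine", "Ten", "Jack", "Queen", "King"]
-- VALUES = [1, 2, 3, 4, 5, 6, 7, 8, 9, 10, 10, 10, 10]
--
-- # index: first letter of a rank word -> list of rank-table indices starting with it
-- BY_FIRST = {}
-- for k in range(len(RANKS)):
--     BY_FIRST.setdefault(RANKS[k][0], []).append(k)
--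
-- def rankIndex(card):
--     # One left-to-right scan of the card: at each position, the first-letter index
--     # gives the only rank words that can start there; keep the smallest table index.
--     best = None
--     for i, ch in enumerate(card):
--         for k in BY_FIRST.get(ch, []):
--             if (best is None or k < best) and card.startswith(RANKS[k], i):
--                 best = k
--     return best
--
-- def assignCardValues(deckOfCards = []):
--     cardValues = {}
--     for card in deckOfCards:
--         k = rankIndex(card)
--         if k is not None:
--             cardValues[card] = VALUES[k]
--     return cardValues
-- ===== Notes on version B (the rewrite author's own statement) =====
-- stated objective: alternative
-- what changed: Replaces A's 13-branch elif chain of full substring searches per card with a first-letter index (dict from initial character to rank-table indices) driving a single left-to-right positional scan of each card that keeps the minimum rank-table index.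
import Mathlib
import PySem

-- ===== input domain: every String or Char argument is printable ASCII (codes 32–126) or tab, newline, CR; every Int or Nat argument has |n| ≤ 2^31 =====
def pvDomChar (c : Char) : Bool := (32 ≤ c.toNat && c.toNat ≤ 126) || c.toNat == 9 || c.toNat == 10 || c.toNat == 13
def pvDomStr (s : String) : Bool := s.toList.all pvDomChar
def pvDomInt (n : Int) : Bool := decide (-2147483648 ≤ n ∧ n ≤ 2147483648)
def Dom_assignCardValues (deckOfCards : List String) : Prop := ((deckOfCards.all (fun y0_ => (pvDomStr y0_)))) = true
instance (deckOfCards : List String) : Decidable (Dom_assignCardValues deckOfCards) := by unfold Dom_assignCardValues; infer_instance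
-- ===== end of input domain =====

-- B replaces A's 13-branch elif chain of substring searches per card by a first-letter
-- index (Char -> rank-table indices) driving a single left-to-right positional scan of
-- each card that keeps the minimum rank-table index (objective: alternative).


-- ===== PORT A =====
-- the loop body of A (the elif chain), applied to deckOfCards[card]
def pvAStep (cv : PySem.Dict String Int) (c : String) : PySem.Dict String Int :=
  if  PySem.Str.isIn "Ace" c then cv.insert c 1
  else if PySem.Str.isIn "Two" c then cv.insert c 2
  else if PySem.Str.isIn "Three" c then cv.insert c 3
  else if PySem.Str.isIn "Four" c then cv.insert c 4
  else if PySem.Str.isIn "Five" c then cv.insert c 5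
  else if PySem.Str.isIn "Six" c then cv.insert c 6
  else if PySem.Str.isIn "Seven" c then cv.insert c 7
  else if PySem.Str.isIn "Eight" c then cv.insert c 8
  else if PySem.Str.isIn "Nine" c then cv.insert c 9
  else if PySem.Str.isIn "Ten" c then cv.insert c 10
  else if PySem.Str.isIn "Jack" c then cv.insert c 10
  else if PySem.Str.isIn "Queen" c then cv.insert c 10
  else if PySem.Str.isIn "King" c then cv.insert c 10
  else cv

def assignCardValues (deckOfCards : List String) : List (String × Int) :=
  ((PySem.List.pyRange 0 (PySem.List.len deckOfCards) 1).foldl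
    (fun (cv : PySem.Dict String Int) card =>
      pvAStep cv (PySem.List.pyGetD deckOfCards card ""))
    PySem.Dict.empty).items

-- ===== PORT B =====
def pvRanks : List String :=
  ["Ace", "Two", "Three", "Four", "Five", "Six", "Seven",
   "Eight", "Nine", "Ten", "Jack", "Queen", "King"]

def pvVals : List Int := [1, 2, 3, 4, 5, 6, 7, 8, 9, 10, 10, 10, 10]

-- Source B's module-level first-letter index: BY_FIRST.setdefault(RANKS[k][0], []).append(k)
-- (= d[ch] = d.get(ch, []) + [k], the key keeping its first-insertion position: Dict.modify).
-- RANKS[k][0]: k < 13 so getD is exact, and every rank word is nonempty so [0] = headD.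
def pvByFirst : PySem.Dict Char (List Nat) :=
  (List.range pvRanks.length).foldl
    (fun d k => d.modify ((pvRanks.getD k "").toList.headD ' ') [] (fun l => l ++ [k]))
    PySem.Dict.empty

-- Source B's rankIndex: one scan over enumerate(card); at each position i only the rank
-- words listed under the character ch in BY_FIRST can start there
-- (card.startswith(RANKS[k], i) = 'RANKS[k] is a prefix of card[i:]', exact for i ≥ 0);
-- keep the smallest table index seen.
def pvRankIndex (card : String) : Option Nat :=
  (PySem.List.enumerate card.toList 0).foldl
    (fun best p =>
      (pvByFirst.getD p.2 []).foldl
        (fun b k =>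
          if (match b with | none => true | some b' => decide (k < b'))
              && PySem.Chars.startswith (card.toList.drop p.1.toNat) (pvRanks.getD k "").toList then
            some k
          else b)
        best)
    none

def assignCardValues_alt (deckOfCards : List String) : List (String × Int) :=
  (deckOfCards.foldl
    (fun (d : PySem.Dict String Int) card =>
      match pvRankIndex card with
      | some k => d.insert card (pvVals.getD k 0)   -- VALUES[k]; k < 13 always, so getD is exact
      | none => d)
    PySem.Dict.empty).items

-- ===== PRECONDITION & SPEC =====
def Spec_assignCardValues (deckOfCards : List String) (out : List (String × Int)) : Prop := out = assignCardValues_alt deckOfCards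
instance (deckOfCards : List String) (out : List (String × Int)) : Decidable (Spec_assignCardValues deckOfCards out) := by unfold Spec_assignCardValues; infer_instance

-- ===== CLAIM (what is proved, stated in full; the proofs are below) =====
def Claim_equal_assignCardValues : Prop := ∀ (deckOfCards : List String), Dom_assignCardValues deckOfCards → Spec_assignCardValues deckOfCards (assignCardValues deckOfCards)

-- ===== LEMMAS AND PROOFS =====

-- merge of two optional minima
def pvMrg : Option Nat → Option Nat → Option Nat
  | none, b => b
  | some x, none => some x
  | some x, some y => some (min x y)

theorem pvMrg_none_right (a : Option Nat) : pvMrg a none = a := by cases a <;> rfl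

theorem pvMrg_assoc (a b c : Option Nat) : pvMrg (pvMrg a b) c = pvMrg a (pvMrg b c) := by
  cases a <;> cases b <;> cases c <;> simp [pvMrg, Nat.min_assoc]

def pvSel (Q : Nat → Bool) (k : Nat) : Option Nat := if Q k then some k else none

def pvSetMin (Q : Nat → Bool) (K : List Nat) : Option Nat :=
  K.foldl (fun b k => pvMrg b (pvSel Q k)) none

-- r is the minimum element of K satisfying A (none if there is none)
def pvIsMin (A : Nat → Bool) (K : List Nat) : Option Nat → Prop
  | none => ∀ k ∈ K, A k = false
  | some m => m ∈ K ∧ A m = true ∧ ∀ k ∈ K, A k = true → m ≤ k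

theorem pvIsMin_unique {A : Nat → Bool} {K : List Nat} {r s : Option Nat}
    (hr : pvIsMin A K r) (hs : pvIsMin A K s) : r = s := by
  cases r with
  | none => cases s with
    | none => rfl
    | some m => exact absurd hs.2.1 (by simp [hr m hs.1])
  | some m => cases s with
    | none => exact absurd hr.2.1 (by simp [hs m hr.1])
    | some m' =>
      have h1 := hr.2.2 m' hs.1 hs.2.1
      have h2 := hs.2.2 m hr.1 hr.2.1
      simp [Nat.le_antisymm h1 h2]

theorem pvIsMin_congr {A B : Nat → Bool} {K : List Nat} {r : Option Nat}
    (h : ∀ k ∈ K, A k = B k) (hr : pvIsMin A K r) : pvIsMin B K r := by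
  cases r with
  | none => intro k hk; rw [← h k hk]; exact hr k hk
  | some m => exact ⟨hr.1, (h m hr.1) ▸ hr.2.1, fun k hk hB => hr.2.2 k hk ((h k hk) ▸ hB)⟩

theorem pvFoldl_mrg_start {α : Type} (f : α → Option Nat) (l : List α) (b : Option Nat) :
    l.foldl (fun b x => pvMrg b (f x)) b = pvMrg b (l.foldl (fun b x => pvMrg b (f x)) none) := by
  induction l generalizing b with
  | nil => simp [pvMrg_none_right]
  | cons x t ih =>
    simp only [List.foldl_cons]
    rw [ih (pvMrg b (f x)), ih (pvMrg none (f x)), pvMrg_assoc]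
    rfl

theorem pvIsMin_mrg {A B : Nat → Bool} {K : List Nat} {r s : Option Nat}
    (hr : pvIsMin A K r) (hs : pvIsMin B K s) :
    pvIsMin (fun k => A k || B k) K (pvMrg r s) := by
  cases r with
  | none =>
    cases s with
    | none => intro k hk; simp [hr k hk, hs k hk]
    | some m =>
      refine ⟨hs.1, by simp [hs.2.1], fun k hk h => ?_⟩
      rcases Bool.or_eq_true_iff.mp h with h | h
      · exact absurd h (by simp [hr k hk])
      · exact hs.2.2 k hk h
  | some m =>
    cases s with
    | none =>
      refine ⟨hr.1, by simp [hr.2.1], fun k hk h => ?_⟩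
      rcases Bool.or_eq_true_iff.mp h with h | h
      · exact hr.2.2 k hk h
      · exact absurd h (by simp [hs k hk])
    | some m' =>
      rcases Nat.le_total m m' with hmm | hmm
      · refine ⟨by simpa [pvMrg, Nat.min_eq_left hmm] using hr.1, by simp [pvMrg, Nat.min_eq_left hmm, hr.2.1], ?_⟩
        intro k hk h
        simp only [pvMrg, Nat.min_eq_left hmm]
        rcases Bool.or_eq_true_iff.mp h with h | h
        · exact hr.2.2 k hk h
        · exact le_trans hmm (hs.2.2 k hk h)
      · refine ⟨by simpa [pvMrg, Nat.min_eq_right hmm] using hs.1, by simp [pvMrg, Nat.min_eq_right hmm, hs.2.1], ?_⟩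
        intro k hk h
        simp only [pvMrg, Nat.min_eq_right hmm]
        rcases Bool.or_eq_true_iff.mp h with h | h
        · exact le_trans hmm (hr.2.2 k hk h)
        · exact hs.2.2 k hk h

theorem pvIsMin_setMin (Q : Nat → Bool) (K : List Nat) : pvIsMin Q K (pvSetMin Q K) := by
  induction K with
  | nil => intro k hk; simp at hk
  | cons k t ih =>
    have : pvSetMin Q (k :: t) = pvMrg (pvSel Q k) (pvSetMin Q t) := by
      simp only [pvSetMin, List.foldl_cons]
      rw [pvFoldl_mrg_start]
      rfl
    rw [this]
    have hsel : pvIsMin (fun j => Q j && decide (j = k)) (k :: t) (pvSel Q k) := by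
      unfold pvSel
      by_cases h : Q k = true
      · simp only [if_pos h]
        exact ⟨List.mem_cons_self, by simp [h], fun j hj hQ => by
          have := (Bool.and_eq_true _ _).mp hQ
          simp at this
          omega⟩
      · simp only [if_neg h]
        intro j hj
        by_cases hjk : j = k
        · simp [hjk, Bool.eq_false_iff.mpr h]
        · simp [hjk]
    have ht : pvIsMin (fun j => Q j && decide (j ∈ t)) (k :: t) (pvSetMin Q t) := by
      have h := ih
      cases hst : pvSetMin Q t with
      | none =>
        rw [hst] at h
        intro j hj
        by_cases hjt : j ∈ t
        · simp [h j hjt, hjt]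
        · simp [hjt]
      | some m =>
        rw [hst] at h
        exact ⟨List.mem_cons_of_mem _ h.1, by simp [h.2.1, h.1], fun j hj hQ => by
          have := (Bool.and_eq_true _ _).mp hQ
          exact h.2.2 j (by simpa using this.2) this.1⟩
    have := pvIsMin_mrg hsel ht
    refine pvIsMin_congr ?_ this
    intro j hj
    rcases List.mem_cons.mp hj with h | h
    · subst h; cases hQ : Q j <;> simp [hQ]
    · cases hQ : Q j <;> simp [hQ, h]

theorem pvIsMin_find?_sorted (p : Nat → Bool) (l : List Nat) (h : l.Pairwise (· < ·)) :
    pvIsMin p l (l.find? p) := by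
  induction l with
  | nil => intro k hk; simp at hk
  | cons x t ih =>
    have hx : ∀ k ∈ t, x < k := fun k hk => (List.pairwise_cons.mp h).1 k hk
    by_cases hp : p x = true
    · rw [List.find?_cons_of_pos hp]
      exact ⟨List.mem_cons_self, hp, fun k hk _ => by
        rcases List.mem_cons.mp hk with h' | h'
        · omega
        · exact Nat.le_of_lt (hx k h')⟩
    · rw [List.find?_cons_of_neg hp]
      have := ih (List.pairwise_cons.mp h).2
      cases hft : t.find? p with
      | none =>
        rw [hft] at this
        intro k hk
        rcases List.mem_cons.mp hk with h' | h'
        · simpa [h'] using hp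
        · exact this k h'
      | some m =>
        rw [hft] at this
        exact ⟨List.mem_cons_of_mem _ this.1, this.2.1, fun k hk hQ => by
          rcases List.mem_cons.mp hk with h' | h'
          · exact absurd hQ (by simp [h' ▸ hp])
          · exact this.2.2 k h' hQ⟩

theorem pvIsMin_lift {Q : Nat → Bool} {K L : List Nat} {r : Option Nat}
    (hKL : ∀ k ∈ K, k ∈ L) (hLK : ∀ k ∈ L, Q k = true → k ∈ K)
    (h : pvIsMin Q K r) : pvIsMin Q L r := by
  cases r with
  | none =>
    intro k hk
    by_contra hq
    simp only [Bool.not_eq_false] at hq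
    exact absurd (h k (hLK k hk hq)) (by simp [hq])
  | some m =>
    exact ⟨hKL m h.1, h.2.1, fun k hk hQ => h.2.2 k (hLK k hk hQ) hQ⟩

theorem pvFold_mrg_isMin {α : Type} (m : α → Option Nat) (P : α → Nat → Bool) (K : List Nat) :
    ∀ (I : List α), (∀ x ∈ I, pvIsMin (P x) K (m x)) →
    pvIsMin (fun k => I.any (fun x => P x k)) K (I.foldl (fun b x => pvMrg b (m x)) none)
  | [] => fun _ => by intro k _; simp
  | x :: t => fun h => by
      simp only [List.foldl_cons]
      rw [pvFoldl_mrg_start]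
      have h1 : pvMrg none (m x) = m x := rfl
      rw [h1]
      have := pvIsMin_mrg (h x List.mem_cons_self)
        (pvFold_mrg_isMin m P K t (fun y hy => h y (List.mem_cons_of_mem _ hy)))
      refine pvIsMin_congr ?_ this
      intro k _
      simp [List.any_cons]

-- every rank word is listed in the index under its first letter
theorem pvByFirst_complete : ∀ k ∈ List.range 13,
    k ∈ pvByFirst.getD ((pvRanks.getD k "").toList.headD ' ') [] := by decide

theorem pvWords_ne_nil : ∀ k ∈ List.range 13, (pvRanks.getD k "").toList ≠ [] := by decide

-- every entry of the index is a rank-table position filed under its word's first letter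
theorem pvByFirst_sound : ∀ (ch : Char) (k : Nat), k ∈ pvByFirst.getD ch [] →
    k ∈ List.range 13 ∧ (pvRanks.getD k "").toList.headD ' ' = ch := by
  intro ch k hk
  have hlit : pvByFirst = ⟨[('A',[0]),('T',[1,2,9]),('F',[3,4]),('S',[5,6]),('E',[7]),('N',[8]),('J',[10]),('Q',[11]),('K',[12])]⟩ := by decide
  rw [hlit, PySem.Dict.getD_eq_get?_getD] at hk
  simp only [PySem.Dict.get?_mk_cons] at hk
  split_ifs at hk with h1 h2 h3 h4 h5 h6 h7 h8 h9 <;>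
    first
      | (obtain rfl := eq_of_beq h1; simp only [Option.getD_some] at hk; fin_cases hk <;> decide)
      | (obtain rfl := eq_of_beq h2; simp only [Option.getD_some] at hk; fin_cases hk <;> decide)
      | (obtain rfl := eq_of_beq h3; simp only [Option.getD_some] at hk; fin_cases hk <;> decide)
      | (obtain rfl := eq_of_beq h4; simp only [Option.getD_some] at hk; fin_cases hk <;> decide)
      | (obtain rfl := eq_of_beq h5; simp only [Option.getD_some] at hk; fin_cases hk <;> decide)
      | (obtain rfl := eq_of_beq h6; simp only [Option.getD_some] at hk; fin_cases hk <;> decide)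
      | (obtain rfl := eq_of_beq h7; simp only [Option.getD_some] at hk; fin_cases hk <;> decide)
      | (obtain rfl := eq_of_beq h8; simp only [Option.getD_some] at hk; fin_cases hk <;> decide)
      | (obtain rfl := eq_of_beq h9; simp only [Option.getD_some] at hk; fin_cases hk <;> decide)
      | (exact absurd hk (by simp [PySem.Dict.get?]))

-- a word starting at position j of c begins with c[j]
theorem pvHead_eq {c w : List Char} {j : Nat} (hw : w ≠ []) (hj : j < c.length)
    (h : PySem.Chars.startswith (c.drop j) w = true) : w.headD ' ' = c.get ⟨j, hj⟩ := by
  obtain ⟨t, ht⟩ := (PySem.Chars.startswith_iff (c.drop j) w).mp h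
  cases w with
  | nil => exact absurd rfl hw
  | cons a w' =>
    have h1 : (c.drop j).head? = some a := by rw [← ht]; rfl
    rw [List.head?_drop, List.getElem?_eq_getElem hj] at h1
    simpa using h1.symm

-- positional any over enumerate = Python's substring test, for a nonempty pattern
theorem pvAny_enum_eq_isIn (c w : String) (hw : w.toList ≠ []) :
    (PySem.List.enumerate c.toList 0).any
      (fun p => PySem.Chars.startswith (c.toList.drop p.1.toNat) w.toList)
      = PySem.Str.isIn w c := by
  rw [Bool.eq_iff_iff]
  simp only [List.any_eq_true, PySem.List.mem_enumerate_iff]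
  rw [show PySem.Str.isIn w c = PySem.Chars.isIn w.toList c.toList from rfl,
      ← PySem.Chars.exists_prefix_drop_iff_isIn]
  constructor
  · rintro ⟨p, ⟨j, hj, rfl⟩, hp⟩
    refine ⟨j, ?_⟩
    rw [PySem.Chars.startswith_iff _ _] at hp
    simpa using hp
  · rintro ⟨j, hj⟩
    by_cases hjn : j < c.toList.length
    · refine ⟨((j : Int), c.toList[j]), ⟨j, hjn, by simp⟩, ?_⟩
      rw [PySem.Chars.startswith_iff _ _]
      simpa using hj
    · exfalso
      have : c.toList.drop j = [] := List.drop_eq_nil_of_le (by omega)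
      rw [this] at hj
      exact hw (List.prefix_nil.mp hj)

-- B's indexed positional scan computes the first rank-table index whose word occurs in the card
theorem pvRankIndex_eq_find (c : String) :
    pvRankIndex c = (List.range 13).find? (fun k => PySem.Str.isIn (pvRanks.getD k "") c) := by
  have hstep : ∀ (p : Int × Char), (fun (b : Option Nat) (k : Nat) =>
      if (match b with | none => true | some b' => decide (k < b'))
          && PySem.Chars.startswith (c.toList.drop p.1.toNat) (pvRanks.getD k "").toList then
        some k
      else b)
      = (fun b k => pvMrg b (pvSel (fun k => PySem.Chars.startswith (c.toList.drop p.1.toNat) (pvRanks.getD k "").toList) k)) := by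
    intro p
    funext b k
    simp only [pvSel]
    by_cases h : PySem.Chars.startswith (c.toList.drop p.1.toNat) (pvRanks.getD k "").toList = true
    · simp only [h]
      cases b with
      | none => simp [pvMrg]
      | some b' =>
        rcases Nat.lt_or_ge k b' with hk | hk
        · simp [pvMrg, hk, Nat.min_eq_right (Nat.le_of_lt hk)]
        · have hnk : ¬ k < b' := by omega
          simp [pvMrg, hnk, Nat.min_eq_left hk]
    · simp only [Bool.not_eq_true] at h
      simp only [h]
      cases b with
      | none => simp [pvMrg]
      | some b' => simp [pvMrg]
  have hbody : pvRankIndex c = (PySem.List.enumerate c.toList 0).foldl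
      (fun best p => pvMrg best (pvSetMin (fun k => PySem.Chars.startswith (c.toList.drop p.1.toNat) (pvRanks.getD k "").toList) (pvByFirst.getD p.2 []))) none := by
    unfold pvRankIndex
    have hfun : (fun (best : Option Nat) (p : Int × Char) =>
        (pvByFirst.getD p.2 []).foldl
          (fun b k =>
            if (match b with | none => true | some b' => decide (k < b'))
                && PySem.Chars.startswith (c.toList.drop p.1.toNat) (pvRanks.getD k "").toList then
              some k
            else b)
          best)
        = (fun best p => pvMrg best (pvSetMin (fun k => PySem.Chars.startswith (c.toList.drop p.1.toNat) (pvRanks.getD k "").toList) (pvByFirst.getD p.2 []))) := by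
      funext best p
      rw [hstep p, pvFoldl_mrg_start]
      rfl
    rw [hfun]
  rw [hbody]
  have hx : ∀ p ∈ PySem.List.enumerate c.toList 0,
      pvIsMin (fun k => PySem.Chars.startswith (c.toList.drop p.1.toNat) (pvRanks.getD k "").toList)
        (List.range 13)
        (pvSetMin (fun k => PySem.Chars.startswith (c.toList.drop p.1.toNat) (pvRanks.getD k "").toList) (pvByFirst.getD p.2 [])) := by
    intro p hp
    obtain ⟨j, hj, rfl⟩ := (PySem.List.mem_enumerate_iff c.toList 0 p).mp hp
    refine pvIsMin_lift ?_ ?_ (pvIsMin_setMin _ _)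
    · intro k hk
      exact (pvByFirst_sound _ k hk).1
    · intro k hk hQ
      have hw := pvWords_ne_nil k hk
      have htn : ((0 : Int) + (j : Int)).toNat = j := by simp
      rw [htn] at hQ
      have hhead := pvHead_eq hw hj hQ
      rw [List.get_eq_getElem] at hhead
      have hc := pvByFirst_complete k hk
      rw [hhead] at hc
      simpa using hc
  have hmin := pvFold_mrg_isMin
    (fun p => pvSetMin (fun k => PySem.Chars.startswith (c.toList.drop p.1.toNat) (pvRanks.getD k "").toList) (pvByFirst.getD p.2 []))
    (fun p k => PySem.Chars.startswith (c.toList.drop p.1.toNat) (pvRanks.getD k "").toList)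
    (List.range 13) (PySem.List.enumerate c.toList 0) hx
  have hcongr := pvIsMin_congr
    (fun k hk => pvAny_enum_eq_isIn c (pvRanks.getD k "") (pvWords_ne_nil k hk)) hmin
  exact pvIsMin_unique hcongr (pvIsMin_find?_sorted _ _ List.pairwise_lt_range)

-- the per-card step of A's elif chain is exactly B's minimum-index scan
theorem pv_step_eq (d : PySem.Dict String Int) (c : String) :
    pvAStep d c
    = (match pvRankIndex c with
       | some k => d.insert c (pvVals.getD k 0)
       | none => d) := by
  rw [pvRankIndex_eq_find]
  have hr : List.range 13 = [0,1,2,3,4,5,6,7,8,9,10,11,12] := by decide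
  rw [hr]
  unfold pvAStep
  by_cases h0 : PySem.Chars.isIn ['A','c','e'] c.toList = true
  · simp [List.find?, pvRanks, List.getD, h0, pvVals]
  simp only [Bool.not_eq_true] at h0
  by_cases h1 : PySem.Chars.isIn ['T','w','o'] c.toList = true
  · simp [List.find?, pvRanks, List.getD, h0, h1, pvVals]
  simp only [Bool.not_eq_true] at h1
  by_cases h2 : PySem.Chars.isIn ['T','h','r','e','e'] c.toList = true
  · simp [List.find?, pvRanks, List.getD, h0, h1, h2, pvVals]
  simp only [Bool.not_eq_true] at h2
  by_cases h3 : PySem.Chars.isIn ['F','o','u','r'] c.toList = true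
  · simp [List.find?, pvRanks, List.getD, h0, h1, h2, h3, pvVals]
  simp only [Bool.not_eq_true] at h3
  by_cases h4 : PySem.Chars.isIn ['F','i','v','e'] c.toList = true
  · simp [List.find?, pvRanks, List.getD, h0, h1, h2, h3, h4, pvVals]
  simp only [Bool.not_eq_true] at h4
  by_cases h5 : PySem.Chars.isIn ['S','i','x'] c.toList = true
  · simp [List.find?, pvRanks, List.getD, h0, h1, h2, h3, h4, h5, pvVals]
  simp only [Bool.not_eq_true] at h5
  by_cases h6 : PySem.Chars.isIn ['S','e','v','e','n'] c.toList = true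
  · simp [List.find?, pvRanks, List.getD, h0, h1, h2, h3, h4, h5, h6, pvVals]
  simp only [Bool.not_eq_true] at h6
  by_cases h7 : PySem.Chars.isIn ['E','i','g','h','t'] c.toList = true
  · simp [List.find?, pvRanks, List.getD, h0, h1, h2, h3, h4, h5, h6, h7, pvVals]
  simp only [Bool.not_eq_true] at h7
  by_cases h8 : PySem.Chars.isIn ['N','i','n','e'] c.toList = true
  · simp [List.find?, pvRanks, List.getD, h0, h1, h2, h3, h4, h5, h6, h7, h8, pvVals]
  simp only [Bool.not_eq_true] at h8
  by_cases h9 : PySem.Chars.isIn ['T','e','n'] c.toList = true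
  · simp [List.find?, pvRanks, List.getD, h0, h1, h2, h3, h4, h5, h6, h7, h8, h9, pvVals]
  simp only [Bool.not_eq_true] at h9
  by_cases h10 : PySem.Chars.isIn ['J','a','c','k'] c.toList = true
  · simp [List.find?, pvRanks, List.getD, h0, h1, h2, h3, h4, h5, h6, h7, h8, h9, h10, pvVals]
  simp only [Bool.not_eq_true] at h10
  by_cases h11 : PySem.Chars.isIn ['Q','u','e','e','n'] c.toList = true
  · simp [List.find?, pvRanks, List.getD, h0, h1, h2, h3, h4, h5, h6, h7, h8, h9, h10, h11, pvVals]
  simp only [Bool.not_eq_true] at h11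
  by_cases h12 : PySem.Chars.isIn ['K','i','n','g'] c.toList = true
  · simp [List.find?, pvRanks, List.getD, h0, h1, h2, h3, h4, h5, h6, h7, h8, h9, h10, h11, h12, pvVals]
  simp only [Bool.not_eq_true] at h12
  simp [List.find?, pvRanks, List.getD, h0, h1, h2, h3, h4, h5, h6, h7, h8, h9, h10, h11, h12]

-- ===== VERDICT (by name: the statement is the Claim_ definition above) =====
theorem assignCardValues_spec : Claim_equal_assignCardValues := by
  intro deck _
  show assignCardValues deck = assignCardValues_alt deck
  unfold assignCardValues assignCardValues_alt
  rw [PySem.List.foldl_pyRange_zero_pyGetD deck "" pvAStep]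
  have hf : pvAStep = (fun (d : PySem.Dict String Int) (c : String) =>
      match pvRankIndex c with
      | some k => d.insert c (pvVals.getD k 0)
      | none => d) := funext fun d => funext fun c => pv_step_eq d c
  rw [hf]
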